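-- pv_equiv track=rewrite | github.com/hpi-dhc/distemist_bioasq_2022 | scripts/error_analysis.py | ner_check_error_type
-- ===== SOURCE A (Python) =====
-- def ner_check_error_type(predicted_entity, ground_truth_entities):
--     # Option 1: false_positive  No match of the prediction to any
--     # groud_truth annotations
--     match = None
--     category = 'false_positive'
--     for ground_truth in ground_truth_entities:
--         # Used to determine string overlap
--         range_prediction = list(range(predicted_entity[0],
--                                       predicted_entity[1] + 1))
--         range_ground_truth = list(range(ground_truth[0],
--                                         ground_truth[1] + 1))
--
--         if predicted_entity == ground_truth:
--             # Option 2: true_positive  Exact match of the prediction to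
--             # the groud_truth annotations
--             match = ground_truth
--             category = 'true_positive'
--             break
--         elif (predicted_entity[0] == ground_truth[0] and
--               predicted_entity[1] == ground_truth[1]):
--             # Option 3: labeling_error  Correct boundaries, but
--             # incorrect label
--             match = ground_truth
--             category = 'labeling_error'
--             break
--         elif len([char_position for char_position in range_prediction
--                   if char_position in range_ground_truth]) != 0:
--             # There is an overlap
--             # There could be an overlap with multiple entities. This
--             # will be ignored as it is still a boundary error and does
--             # not provide additoinal information
--             if predicted_entity[2] == ground_truth[2]:
--                 # Option 4: boundary_error  Correct Label, but only
--                 # overlapping boundaries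
--                 match = ground_truth
--                 category = 'boundary_error'
--                 break
--             else:
--                 # Option 5: labeling_boundary_error  Incorrect label,
--                 # but overlapping boundaries
--                 match = ground_truth
--                 category = 'label_boundary_error'
--                 break
--     return category, match
-- ===== SOURCE B (Python) =====
-- def ner_check_error_type(predicted_entity, ground_truth_entities):
--     ps, pe, pl = predicted_entity
--     for gt in ground_truth_entities:
--         gs, ge, gl = gt
--         if ps == gs and pe == ge:
--             # Exact boundaries: true positive if the label also matches
--             return ('true_positive' if pl == gl else 'labeling_error'), gt
--         if max(ps, gs) <= min(pe, ge):
--             # Intervals [ps,pe] and [gs,ge] overlap (O(1) arithmetic)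
--             return ('boundary_error' if pl == gl else 'label_boundary_error'), gt
--     return 'false_positive', None
-- ===== Notes on version B (the rewrite author's own statement) =====
-- stated objective: faster
-- what changed: Replaces the quadratic range-list materialisation and membership scan with O(1) interval-overlap arithmetic (max-start <= min-end) and returns directly from a single early-exit loop instead of tracking match/category state with break.
import Mathlib
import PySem

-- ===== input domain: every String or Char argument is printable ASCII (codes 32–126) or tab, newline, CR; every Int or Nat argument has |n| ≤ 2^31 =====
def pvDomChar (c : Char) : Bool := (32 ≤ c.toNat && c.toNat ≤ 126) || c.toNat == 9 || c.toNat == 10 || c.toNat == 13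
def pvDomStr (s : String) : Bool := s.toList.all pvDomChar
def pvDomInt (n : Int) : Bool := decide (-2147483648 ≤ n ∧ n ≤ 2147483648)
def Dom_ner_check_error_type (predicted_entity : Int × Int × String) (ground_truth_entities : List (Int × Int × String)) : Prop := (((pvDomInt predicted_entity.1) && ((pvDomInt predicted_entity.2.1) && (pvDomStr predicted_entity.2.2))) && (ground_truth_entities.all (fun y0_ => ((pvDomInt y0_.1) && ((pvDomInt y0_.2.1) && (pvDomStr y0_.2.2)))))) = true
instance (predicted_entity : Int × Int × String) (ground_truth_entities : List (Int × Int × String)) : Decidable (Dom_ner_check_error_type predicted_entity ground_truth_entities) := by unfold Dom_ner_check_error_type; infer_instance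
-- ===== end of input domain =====

-- B replaces A's materialised range-list intersection by O(1) interval-overlap arithmetic
-- (max-start <= min-end) and returns directly from the loop; objective: faster (asymptotic).

-- ===== PORT A =====
-- A's for-loop with break, transcribed as structural recursion; the two range lists and the
-- membership-filter overlap test are built exactly as in the Python.
def nerLoopA (p : Int × Int × String) : List (Int × Int × String) → String × (Option (Int × Int × String))
  | [] => ("false_positive", none)
  | g :: rest =>
    let range_prediction := PySem.List.pyRange p.1 (p.2.1 + 1) 1
    let range_ground_truth := PySem.List.pyRange g.1 (g.2.1 + 1) 1
    if p = g then ("true_positive", some g)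
    else if p.1 = g.1 ∧ p.2.1 = g.2.1 then ("labeling_error", some g)
    else if (range_prediction.filter (fun c => c ∈ range_ground_truth)).length ≠ 0 then
      if p.2.2 = g.2.2 then ("boundary_error", some g) else ("label_boundary_error", some g)
    else nerLoopA p rest

def ner_check_error_type (predicted_entity : Int × Int × String) (ground_truth_entities : List (Int × Int × String)) : String × (Option (Int × Int × String)) :=
  nerLoopA predicted_entity ground_truth_entities

-- ===== PORT B =====
def nerLoopB (ps pe : Int) (pl : String) : List (Int × Int × String) → String × (Option (Int × Int × String))
  | [] => ("false_positive", none)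
  | g :: rest =>
    if ps = g.1 ∧ pe = g.2.1 then
      ((if pl = g.2.2 then "true_positive" else "labeling_error"), some g)
    else if max ps g.1 ≤ min pe g.2.1 then
      ((if pl = g.2.2 then "boundary_error" else "label_boundary_error"), some g)
    else nerLoopB ps pe pl rest

def ner_check_error_type_alt (predicted_entity : Int × Int × String) (ground_truth_entities : List (Int × Int × String)) : String × (Option (Int × Int × String)) :=
  nerLoopB predicted_entity.1 predicted_entity.2.1 predicted_entity.2.2 ground_truth_entities

-- ===== PRECONDITION & SPEC =====
def Spec_ner_check_error_type (predicted_entity : Int × Int × String) (ground_truth_entities : List (Int × Int × String)) (out : String × (Option (Int × Int × String))) : Prop := out = ner_check_error_type_alt predicted_entity ground_truth_entities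
instance (predicted_entity : Int × Int × String) (ground_truth_entities : List (Int × Int × String)) (out : String × (Option (Int × Int × String))) : Decidable (Spec_ner_check_error_type predicted_entity ground_truth_entities out) := by unfold Spec_ner_check_error_type; infer_instance

-- ===== CLAIM (what is proved, stated in full; the proofs are below) =====
def Claim_equal_ner_check_error_type : Prop := ∀ (predicted_entity : Int × Int × String) (ground_truth_entities : List (Int × Int × String)), Dom_ner_check_error_type predicted_entity ground_truth_entities → Spec_ner_check_error_type predicted_entity ground_truth_entities (ner_check_error_type predicted_entity ground_truth_entities)

-- ===== LEMMAS AND PROOFS =====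

-- A's range-list intersection is nonempty iff the closed intervals [a,b] and [c,d] overlap.
theorem ner_overlap_iff (a b c d : Int) :
    ((PySem.List.pyRange a (b + 1) 1).filter
      (fun x => x ∈ PySem.List.pyRange c (d + 1) 1)).length ≠ 0 ↔ max a c ≤ min b d := by
  rw [Ne, List.length_eq_zero_iff, List.filter_eq_nil_iff]
  push_neg
  constructor
  · rintro ⟨x, hx, hmem⟩
    rw [PySem.List.mem_pyRange_one] at hx
    simp only [decide_eq_true_eq, PySem.List.mem_pyRange_one] at hmem
    omega
  · intro h
    refine ⟨max a c, ?_, ?_⟩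
    · rw [PySem.List.mem_pyRange_one]; omega
    · simp only [decide_eq_true_eq, PySem.List.mem_pyRange_one]; omega

theorem nerLoop_eq (p : Int × Int × String) (l : List (Int × Int × String)) :
    nerLoopA p l = nerLoopB p.1 p.2.1 p.2.2 l := by
  induction l with
  | nil => rfl
  | cons g rest ih =>
    simp only [nerLoopA, nerLoopB]
    by_cases hb : p.1 = g.1 ∧ p.2.1 = g.2.1
    · by_cases hl : p.2.2 = g.2.2
      · have hpg : p = g := by
          obtain ⟨h1, h2⟩ := hb
          exact Prod.ext h1 (Prod.ext h2 hl)
        simp [hpg]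
      · have hpg : p ≠ g := by
          intro h; exact hl (by rw [h])
        simp [hpg, hb, hl]
    · have hpg : p ≠ g := by
        intro h; exact hb ⟨by rw [h], by rw [h]⟩
      simp only [if_neg hpg, if_neg hb]
      by_cases hov : max p.1 g.1 ≤ min p.2.1 g.2.1
      · rw [if_pos ((ner_overlap_iff p.1 p.2.1 g.1 g.2.1).mpr hov), if_pos hov]
        split_ifs <;> rfl
      · rw [if_neg (fun h => hov ((ner_overlap_iff p.1 p.2.1 g.1 g.2.1).mp h)), if_neg hov]
        exact ih

-- ===== VERDICT (by name: the statement is the Claim_ definition above) =====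
theorem ner_check_error_type_spec : Claim_equal_ner_check_error_type := by
  intro p gts _
  unfold Spec_ner_check_error_type ner_check_error_type ner_check_error_type_alt
  exact nerLoop_eq p gts
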